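-- pv_equiv track=rewrite | github.com/tad-agentics/loma.ai.vn | backend/loma/intent.py | _first_signal_position
-- ===== SOURCE A (Python) =====
-- def _first_signal_position(text_lower: str, patterns: dict) -> int:
--     """Return character position of the earliest signal match. Used for disambiguation."""
--     earliest = len(text_lower)
--     for key in ("vi_signals", "en_signals", "en_business_signals"):
--         for signal in patterns.get(key, []):
--             pos = text_lower.find(signal.lower())
--             if 0 <= pos < earliest:
--                 earliest = pos
--     return earliest
-- ===== SOURCE B (Python) =====
-- def _first_signal_position(text_lower: str, patterns: dict) -> int:
--     """Position-major scan: gather the lowered signals once, then walk the text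
--     left to right and return the first index where any signal starts."""
--     signals = [s.lower()
--                for key in ("vi_signals", "en_signals", "en_business_signals")
--                for s in patterns.get(key, [])]
--     for i in range(len(text_lower)):
--         if any(text_lower.startswith(s, i) for s in signals):
--             return i
--     return len(text_lower)
-- ===== Notes on version B (the rewrite author's own statement) =====
-- stated objective: alternative
-- what changed: B flattens and lowers all signals once, then scans the text position by position with startswith and returns at the first matching index, instead of A's pattern-major loop that runs find for every signal and keeps the minimum.
import Mathlib
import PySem

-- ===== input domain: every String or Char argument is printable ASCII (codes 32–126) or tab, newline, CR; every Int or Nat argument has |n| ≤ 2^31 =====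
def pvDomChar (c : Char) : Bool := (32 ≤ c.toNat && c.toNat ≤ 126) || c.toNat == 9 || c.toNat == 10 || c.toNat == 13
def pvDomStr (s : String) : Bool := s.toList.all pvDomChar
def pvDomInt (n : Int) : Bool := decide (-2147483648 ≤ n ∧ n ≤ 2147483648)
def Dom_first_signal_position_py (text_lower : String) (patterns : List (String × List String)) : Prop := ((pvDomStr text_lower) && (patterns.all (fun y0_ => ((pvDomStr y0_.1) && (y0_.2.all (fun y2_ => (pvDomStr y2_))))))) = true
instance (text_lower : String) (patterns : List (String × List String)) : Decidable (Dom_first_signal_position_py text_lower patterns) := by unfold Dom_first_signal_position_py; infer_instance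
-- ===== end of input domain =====

-- B gathers the lowered signals once and scans the text position-by-position with
-- startswith (first hit wins), instead of A's pattern-major find-and-minimize; alternative
-- decomposition, same asymptotic cost.


-- ===== PORT A =====
-- literal transliteration of A: fold over the three keys, inner fold over
-- patterns.get(key, []), keeping the smallest nonnegative find position.
def first_signal_position_py (text_lower : String) (patterns : List (String × List String)) : Int :=
  List.foldl
    (fun earliest key =>
      List.foldl
        (fun earliest signal =>
          let pos := PySem.Chars.find text_lower.toList (PySem.Chars.lower signal.toList)
          if 0 ≤ pos ∧ pos < earliest then pos else earliest)
        earliest ((PySem.Dict.mk patterns).getD key []))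
    ((text_lower.toList.length : Nat) : Int)
    ["vi_signals", "en_signals", "en_business_signals"]

-- ===== PORT B =====
-- the 'for i in range(len(text))' loop with early return; Python's
-- text.startswith(s, i) with 0 ≤ i ≤ len(text) is exactly startswith on (drop i) — exact here.
def pvScan (cs : List Char) (sigs : List (List Char)) : Nat → Nat → Int
  | _, 0 => (cs.length : Int)
  | i, fuel + 1 =>
    if sigs.any (fun s => PySem.Chars.startswith (cs.drop i) s) then (i : Int)
    else pvScan cs sigs (i + 1) fuel

def first_signal_position_py_alt (text_lower : String) (patterns : List (String × List String)) : Int :=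
  let cs := text_lower.toList
  let signals :=
    (["vi_signals", "en_signals", "en_business_signals"].flatMap
        (fun key => (PySem.Dict.mk patterns).getD key [])).map
      (fun s => PySem.Chars.lower s.toList)
  pvScan cs signals 0 cs.length

-- ===== PRECONDITION & SPEC =====
def Spec_first_signal_position_py (text_lower : String) (patterns : List (String × List String)) (out : Int) : Prop := out = first_signal_position_py_alt text_lower patterns
instance (text_lower : String) (patterns : List (String × List String)) (out : Int) : Decidable (Spec_first_signal_position_py text_lower patterns out) := by unfold Spec_first_signal_position_py; infer_instance

-- ===== CLAIM (what is proved, stated in full; the proofs are below) =====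
def Claim_equal_first_signal_position_py : Prop := ∀ (text_lower : String) (patterns : List (String × List String)), Dom_first_signal_position_py text_lower patterns → Spec_first_signal_position_py text_lower patterns (first_signal_position_py text_lower patterns)

-- ===== LEMMAS AND PROOFS =====

-- A's inner update step, with the signal already lowered.
def pvStep (cs : List Char) (e : Int) (p : List Char) : Int :=
  if 0 ≤ PySem.Chars.find cs p ∧ PySem.Chars.find cs p < e then PySem.Chars.find cs p else e

-- the flattened, lowered signal list both sides effectively process
def pvSigs (patterns : List (String × List String)) : List (List Char) :=
  (["vi_signals", "en_signals", "en_business_signals"].flatMap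
      (fun key => (PySem.Dict.mk patterns).getD key [])).map
    (fun s => PySem.Chars.lower s.toList)

lemma portA_eq (t : String) (ps : List (String × List String)) :
    first_signal_position_py t ps =
      List.foldl (pvStep t.toList) ((t.toList.length : Nat) : Int) (pvSigs ps) := by
  simp [first_signal_position_py, pvSigs, pvStep, List.foldl_map]

lemma foldl_step_le (cs : List Char) (sigs : List (List Char)) :
    ∀ e : Int, List.foldl (pvStep cs) e sigs ≤ e := by
  induction sigs with
  | nil => intro e; simp
  | cons p l ih =>
    intro e
    have h1 : pvStep cs e p ≤ e := by
      unfold pvStep; split_ifs with h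
      · exact le_of_lt h.2
      · exact le_rfl
    exact le_trans (ih (pvStep cs e p)) h1

lemma foldl_step_le_find (cs : List Char) (sigs : List (List Char)) (p : List Char)
    (hp : p ∈ sigs) (h0 : 0 ≤ PySem.Chars.find cs p) :
    ∀ e : Int, List.foldl (pvStep cs) e sigs ≤ PySem.Chars.find cs p := by
  induction sigs with
  | nil => cases hp
  | cons q l ih =>
    intro e
    rcases List.mem_cons.mp hp with h | h
    · subst h
      have : pvStep cs e p ≤ PySem.Chars.find cs p := by
        unfold pvStep; split_ifs with h <;> omega
      exact le_trans (foldl_step_le cs l _) this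
    · exact ih h _

lemma foldl_step_cases (cs : List Char) (sigs : List (List Char)) :
    ∀ e : Int, List.foldl (pvStep cs) e sigs = e ∨
      ∃ p ∈ sigs, List.foldl (pvStep cs) e sigs = PySem.Chars.find cs p ∧
        0 ≤ PySem.Chars.find cs p := by
  induction sigs with
  | nil => intro e; left; rfl
  | cons q l ih =>
    intro e
    rcases ih (pvStep cs e q) with h | ⟨p, hp, h1, h2⟩
    · simp only [List.foldl_cons, h]
      unfold pvStep; split_ifs with hc
      · exact Or.inr ⟨q, List.mem_cons_self, rfl, hc.1⟩
      · exact Or.inl rfl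
    · exact Or.inr ⟨p, List.mem_cons_of_mem _ hp, h1, h2⟩

lemma scan_none (cs : List Char) (sigs : List (List Char)) :
    ∀ (fuel i : Nat),
      (∀ j, i ≤ j → j < i + fuel →
        sigs.any (fun s => PySem.Chars.startswith (cs.drop j) s) = false) →
      pvScan cs sigs i fuel = (cs.length : Int) := by
  intro fuel
  induction fuel with
  | zero => intro i _; rfl
  | succ n ih =>
    intro i h
    have hi := h i le_rfl (by omega)
    simp only [pvScan, hi, Bool.false_eq_true, if_false]
    exact ih (i + 1) (fun j h1 h2 => h j (by omega) (by omega))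

lemma scan_hit (cs : List Char) (sigs : List (List Char)) :
    ∀ (fuel i j : Nat), i ≤ j → j < i + fuel →
      sigs.any (fun s => PySem.Chars.startswith (cs.drop j) s) = true →
      (∀ j', i ≤ j' → j' < j →
        sigs.any (fun s => PySem.Chars.startswith (cs.drop j') s) = false) →
      pvScan cs sigs i fuel = (j : Int) := by
  intro fuel
  induction fuel with
  | zero => intro i j h1 h2; omega
  | succ n ih =>
    intro i j h1 h2 hQ hmin
    rcases Nat.eq_or_lt_of_le h1 with heq | hlt
    · subst heq; simp only [pvScan, hQ, if_true]
    · have hi : sigs.any (fun s => PySem.Chars.startswith (cs.drop i) s) = false :=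
        hmin i le_rfl hlt
      simp only [pvScan, hi, Bool.false_eq_true, if_false]
      exact ih (i + 1) j hlt (by omega) hQ (fun j' ha hb => hmin j' (by omega) hb)

-- a prefix of (drop j) is an infix of the whole list
lemma prefix_drop_infix {p cs : List Char} {j : Nat} (h : p <+: cs.drop j) : p <:+: cs :=
  h.isInfix.trans (cs.drop_suffix j).isInfix

theorem first_signal_position_py_spec : Claim_equal_first_signal_position_py := by
  intro t ps _
  unfold Spec_first_signal_position_py
  rw [portA_eq]
  show List.foldl (pvStep t.toList) _ (pvSigs ps) = _
  unfold first_signal_position_py_alt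
  set cs := t.toList with hcs
  set sigs := pvSigs ps with hsigs
  have hsigs' : (["vi_signals", "en_signals", "en_business_signals"].flatMap
      (fun key => (PySem.Dict.mk ps).getD key [])).map
      (fun s => PySem.Chars.lower s.toList) = sigs := rfl
  simp only [hsigs']
  set n := cs.length with hn
  set Q : Nat → Bool := fun j => sigs.any (fun s => PySem.Chars.startswith (cs.drop j) s)
    with hQdef
  by_cases hex : ∃ j, j < n ∧ Q j = true
  · classical
    let j := Nat.find hex
    have hspec : j < n ∧ Q j = true := Nat.find_spec hex
    have hmin : ∀ m, m < j → ¬(m < n ∧ Q m = true) := fun m hm => Nat.find_min hex hm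
    have hminQ : ∀ j', 0 ≤ j' → j' < j → Q j' = false := by
      intro j' _ hj'
      have := hmin j' hj'
      have hj'n : j' < n := lt_trans hj' hspec.1
      simpa [hj'n] using this
    have hB : pvScan cs sigs 0 n = (j : Int) :=
      scan_hit cs sigs n 0 j (Nat.zero_le _) (by omega) hspec.2 hminQ
    rw [hB]
    -- A side: the fold equals j
    obtain ⟨p, hp, hpre⟩ : ∃ p ∈ sigs, p <+: cs.drop j := by
      rcases List.any_eq_true.mp hspec.2 with ⟨p, hp, hsw⟩
      exact ⟨p, hp, (PySem.Chars.startswith_iff _ _).mp hsw⟩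
    have hfind0 : 0 ≤ PySem.Chars.find cs p :=
      (PySem.Chars.find_nonneg_iff cs p).mpr (prefix_drop_infix hpre)
    obtain ⟨hat, hfst⟩ := PySem.Chars.find_spec hfind0
    have hle_j : (PySem.Chars.find cs p).toNat ≤ j := by
      by_contra hc
      exact hfst j (by omega) hpre
    have hQfind : Q (PySem.Chars.find cs p).toNat = true := by
      refine List.any_eq_true.mpr ⟨p, hp, ?_⟩
      exact (PySem.Chars.startswith_iff _ _).mpr hat
    have hfind_j : PySem.Chars.find cs p = (j : Int) := by
      have hlt_n : (PySem.Chars.find cs p).toNat < n := by omega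
      have := Nat.find_min' hex ⟨hlt_n, hQfind⟩
      omega
    have hA_le : List.foldl (pvStep cs) (n : Int) sigs ≤ (j : Int) := by
      have := foldl_step_le_find cs sigs p hp hfind0 (n : Int)
      omega
    have hA_ge : (j : Int) ≤ List.foldl (pvStep cs) (n : Int) sigs := by
      rcases foldl_step_cases cs sigs (n : Int) with h | ⟨p', hp', h1, h2⟩
      · omega
      · obtain ⟨hat', hfst'⟩ := PySem.Chars.find_spec h2
        have hQ' : Q (PySem.Chars.find cs p').toNat = true := by
          refine List.any_eq_true.mpr ⟨p', hp', ?_⟩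
          exact (PySem.Chars.startswith_iff _ _).mpr hat'
        have hlt_n' : (PySem.Chars.find cs p').toNat < n := by omega
        have := Nat.find_min' hex ⟨hlt_n', hQ'⟩
        omega
    omega
  · have hQf : ∀ j, j < n → Q j = false := by
      intro j hj
      by_contra hc
      exact hex ⟨j, hj, by simpa using hc⟩
    have hB : pvScan cs sigs 0 n = (n : Int) :=
      scan_none cs sigs n 0 (fun j _ hj => hQf j (by omega))
    rw [hB]
    rcases foldl_step_cases cs sigs (n : Int) with h | ⟨p, hp, h1, h2⟩
    · exact h
    · have hle : List.foldl (pvStep cs) (n : Int) sigs ≤ (n : Int) := foldl_step_le cs sigs _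
      obtain ⟨hat, _⟩ := PySem.Chars.find_spec h2
      by_contra hne
      have hlt : (PySem.Chars.find cs p).toNat < n := by omega
      have : Q (PySem.Chars.find cs p).toNat = true := by
        refine List.any_eq_true.mpr ⟨p, hp, ?_⟩
        exact (PySem.Chars.startswith_iff _ _).mpr hat
      rw [hQf _ hlt] at this
      exact Bool.false_ne_true this
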